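-- pv_equiv track=rewrite | github.com/TonikX/ITMO_ICT_WebDevelopment_2024-2025 | students/k3342/Alice_Liberman/Lr1/task5/server.py | post_parse
-- ===== SOURCE A (Python) =====
-- def post_parse(parameters):
--     parameters = parameters.split('&')
--     subject = None
--     grade = None
--     for param in parameters:
--         key, value = param.split('=')
--         if key == 'subject':
--             subject = value
--         elif key == 'grade':
--             grade = value
--     return subject, grade
-- ===== SOURCE B (Python) =====
-- def post_parse(parameters):
--     pairs = []
--     for p in parameters.split('&'):
--         key, value = p.split('=')
--         pairs.append((key, value))
--
--     def last_value(wanted):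
--         return next((v for k, v in reversed(pairs) if k == wanted), None)
--
--     return last_value('subject'), last_value('grade')
-- ===== Notes on version B (the rewrite author's own statement) =====
-- stated objective: alternative
-- what changed: B materialises the (key,value) pairs once and then answers each key by a separate back-to-front search for the last occurrence (early-exit reversed scan), instead of A's single forward pass that keeps updating two guarded scalar variables.
import Mathlib
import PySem

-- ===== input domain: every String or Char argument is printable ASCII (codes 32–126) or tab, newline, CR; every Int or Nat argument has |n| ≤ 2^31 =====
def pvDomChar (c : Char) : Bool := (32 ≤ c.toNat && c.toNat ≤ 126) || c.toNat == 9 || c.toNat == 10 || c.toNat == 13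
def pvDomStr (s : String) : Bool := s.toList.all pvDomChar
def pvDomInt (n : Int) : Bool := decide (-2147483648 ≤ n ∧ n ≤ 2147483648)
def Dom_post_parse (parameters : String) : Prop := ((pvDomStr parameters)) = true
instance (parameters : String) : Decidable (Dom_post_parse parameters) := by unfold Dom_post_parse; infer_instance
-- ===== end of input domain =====

-- B materialises the (key,value) pairs and answers each key by a back-to-front early-exit search; A keeps two guarded scalars in a forward pass.

-- ===== PORT A =====
-- for param in parameters.split('&'): key,value = param.split('='); guarded assignments
-- the '_ => st' branch is unreachable under Pre_ (Python raises ValueError on an unpack mismatch there)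
def post_parse (parameters : String) : Option String × Option String :=
  (PySem.Chars.splitOn parameters.toList ['&']).foldl
    (fun st param =>
      match PySem.Chars.splitOn param ['='] with
      | [key, value] =>
          if key = "subject".toList then (some (String.ofList value), st.2)
          else if key = "grade".toList then (st.1, some (String.ofList value))
          else st
      | _ => st)
    (none, none)

-- ===== PORT B =====
-- key, value = p.split('='); the fallback is unreachable under Pre_ (Python raises ValueError there)
def pvPairOf (p : List Char) : List Char × String :=
  let parts := PySem.Chars.splitOn p ['=']
  if parts.length = 2 then (parts[0]!, String.ofList parts[1]!) else ([], "")

-- next((v for k, v in reversed(pairs) if k == wanted), None): first match scanning back-to-front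
def pvLastValue (pairs : List (List Char × String)) (wanted : List Char) : Option String :=
  (pairs.reverse.find? (fun kv => kv.1 = wanted)).map (·.2)

def post_parse_alt (parameters : String) : Option String × Option String :=
  let pairs := (PySem.Chars.splitOn parameters.toList ['&']).map pvPairOf
  (pvLastValue pairs "subject".toList, pvLastValue pairs "grade".toList)

-- ===== PRECONDITION & SPEC =====
-- Pre_ excludes exactly the inputs where some ampersand-separated piece does not split at the equals sign into two parts: there both Pythons raise ValueError.
def Pre_post_parse (parameters : String) : Prop :=
  ∀ p ∈ PySem.Chars.splitOn parameters.toList ['&'], (PySem.Chars.splitOn p ['=']).length = 2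
instance (parameters : String) : Decidable (Pre_post_parse parameters) := by
  unfold Pre_post_parse; infer_instance
def pvWitness_post_parse : String := "subject=math&grade=5"

def Spec_post_parse (parameters : String) (out : Option String × Option String) : Prop := out = post_parse_alt parameters
instance (parameters : String) (out : Option String × Option String) : Decidable (Spec_post_parse parameters out) := by unfold Spec_post_parse; infer_instance

-- ===== CLAIM (what is proved, stated in full; the proofs are below) =====
def Claim_equal_post_parse : Prop := ∀ (parameters : String), Dom_post_parse parameters → Pre_post_parse parameters → Spec_post_parse parameters (post_parse parameters)

-- ===== LEMMAS AND PROOFS =====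

-- peeling one pair off the front of B's list: the back-to-front search looks at it last
theorem pvLastValue_cons (x : List Char × String) (l : List (List Char × String)) (w : List Char) :
    pvLastValue (x :: l) w =
      ((pvLastValue l w).elim (if x.1 = w then some x.2 else none) some) := by
  unfold pvLastValue
  simp only [List.reverse_cons, List.find?_append]
  cases h : (l.reverse.find? (fun kv => kv.1 = w)) <;> simp [List.find?]
  · split_ifs with hx <;> simp [hx]

set_option maxRecDepth 10000 in
-- A's fold over ps starting from (s, g) equals B's two back-to-front searches, falling back to (s, g)
theorem pv_loop_inv (ps : List (List Char)) (s g : Option String) :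
    ps.foldl
      (fun st param =>
        match PySem.Chars.splitOn param ['='] with
        | [key, value] =>
            if key = "subject".toList then (some (String.ofList value), st.2)
            else if key = "grade".toList then (st.1, some (String.ofList value))
            else st
        | _ => st)
      (s, g)
    = (((pvLastValue (ps.map pvPairOf) "subject".toList).elim s some),
       ((pvLastValue (ps.map pvPairOf) "grade".toList).elim g some)) := by
  induction ps generalizing s g with
  | nil => simp [pvLastValue]
  | cons p ps ih =>
    simp only [List.foldl_cons, List.map_cons]
    have hstep :
        (match PySem.Chars.splitOn p ['='] with
          | [key, value] =>
              if key = "subject".toList then (some (String.ofList value), g)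
              else if key = "grade".toList then (s, some (String.ofList value))
              else (s, g)
          | _ => (s, g))
        = ((if (pvPairOf p).1 = "subject".toList then some (pvPairOf p).2 else s),
           (if (pvPairOf p).1 = "grade".toList then some (pvPairOf p).2 else g)) := by
      unfold pvPairOf
      rcases h : PySem.Chars.splitOn p ['='] with _ | ⟨k, _ | ⟨v, rest⟩⟩
      · simp
      · simp
      · cases rest with
        | cons a l => simp
        | nil =>
          simp only [List.length_cons, List.length_nil, List.getElem!_cons_zero,
            List.getElem!_cons_succ]
          by_cases h1 : k = "subject".toList
          · subst h1
            simp
          · by_cases h2 : k = "grade".toList <;>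
              simp only [show ("subject".toList : List Char) = ['s','u','b','j','e','c','t'] from rfl,
                show ("grade".toList : List Char) = ['g','r','a','d','e'] from rfl] at h1 h2 ⊢ <;>
              simp [h1, h2]
    rw [hstep, ih]
    rw [pvLastValue_cons, pvLastValue_cons]
    cases hs : pvLastValue (ps.map pvPairOf) "subject".toList <;>
      cases hg : pvLastValue (ps.map pvPairOf) "grade".toList <;>
      simp only [Option.elim] <;> split_ifs <;> simp

-- ===== VERDICT (by name: the statement is the Claim_ definition above) =====
theorem post_parse_spec : Claim_equal_post_parse := by
  intro parameters _ _
  unfold Spec_post_parse post_parse post_parse_alt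
  rw [pv_loop_inv]
  simp [Option.elim]
  constructor <;> cases h : pvLastValue ((PySem.Chars.splitOn parameters.toList ['&']).map pvPairOf) _ <;> simp
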